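-- pv_equiv track=rewrite | github.com/barium-sulphate/IP-Assignment | IP_Assignment_2/2024492_Q4.py | yellow
-- ===== SOURCE A (Python) =====
-- def green(guess,target):
--     ans=[]
--     for i in range(5):
--         if guess[i]==target[i]:
--             ans.append(i)
--     return ans
--
-- def yellow(guess,target):
--     check=green(guess,target)
--     possible=set()
--     for i in range(5):
--         if i not in check:
--             for j in range(5):
--                 if j not in check and guess[i]==target[j]:
--                     possible.add(guess[i])
--     return sorted(list(possible))
-- ===== SOURCE B (Python) =====
-- def yellow(guess, target):
--     # Collect letters at mismatched (non-green) positions, on each side.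
--     gl = []
--     tl = []
--     for i in range(5):
--         if guess[i] != target[i]:
--             gl.append(guess[i])
--             tl.append(target[i])
--     gl.sort()
--     tl.sort()
--     # Two-pointer merge of the two sorted lists: emit each common letter once,
--     # already in sorted order (no set, no final sort).
--     out = []
--     p = 0
--     q = 0
--     while p < len(gl) and q < len(tl):
--         if gl[p] < tl[q]:
--             p += 1
--         elif tl[q] < gl[p]:
--             q += 1
--         else:
--             if not out or out[-1] != gl[p]:
--                 out.append(gl[p])
--             p += 1
--             q += 1
--     return out
-- ===== Notes on version B (the rewrite author's own statement) =====
-- stated objective: alternative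
-- what changed: Replaces A's nested quadratic scan plus set plus final sort with a sort-then-merge algorithm: collect the letters at mismatched positions on each side, sort the two small lists, and a two-pointer merge emits each common letter once already in order (no set, no final sort).
import Mathlib
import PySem

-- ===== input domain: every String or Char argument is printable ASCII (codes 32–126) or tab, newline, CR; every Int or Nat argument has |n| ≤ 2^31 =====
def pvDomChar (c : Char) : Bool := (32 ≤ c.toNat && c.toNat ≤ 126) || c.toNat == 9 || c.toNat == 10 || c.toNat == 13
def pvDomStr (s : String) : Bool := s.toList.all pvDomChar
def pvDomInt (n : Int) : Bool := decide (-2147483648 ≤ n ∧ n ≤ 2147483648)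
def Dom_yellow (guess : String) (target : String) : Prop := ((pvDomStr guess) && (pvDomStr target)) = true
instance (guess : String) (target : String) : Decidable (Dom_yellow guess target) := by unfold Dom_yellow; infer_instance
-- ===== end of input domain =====

-- B replaces A's nested scan + set + final sort by sort-then-merge: the letters at
-- mismatched positions of each side are sorted and a two-pointer merge emits each
-- common letter once, already in order (objective: alternative).

-- ===== PORT A =====
def pvGreen (guess : String) (target : String) : List Int :=
  (PySem.List.pyRange 0 5 1).foldl
    (fun ans i =>
      if PySem.List.pyGetD guess.toList i ' ' = PySem.List.pyGetD target.toList i ' '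
      then ans ++ [i] else ans) []

def yellow (guess : String) (target : String) : List String :=
  let check := pvGreen guess target
  let possible : PySem.Set String :=
    (PySem.List.pyRange 0 5 1).foldl
      (fun poss i =>
        if i ∉ check then
          (PySem.List.pyRange 0 5 1).foldl
            (fun poss j =>
              if j ∉ check ∧ PySem.List.pyGetD guess.toList i ' ' = PySem.List.pyGetD target.toList j ' '
              then PySem.Set.add poss (String.ofList [PySem.List.pyGetD guess.toList i ' '])
              else poss) poss
        else poss) PySem.Set.empty
  PySem.List.sorted possible (fun x => x) false

-- ===== PORT B =====
-- the single loop collecting guess/target letters at mismatched positions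
def pvLetters (guess : String) (target : String) : List Char × List Char :=
  (PySem.List.pyRange 0 5 1).foldl
    (fun p i =>
      if PySem.List.pyGetD guess.toList i ' ' ≠ PySem.List.pyGetD target.toList i ' '
      then (p.1 ++ [PySem.List.pyGetD guess.toList i ' '],
            p.2 ++ [PySem.List.pyGetD target.toList i ' '])
      else p) ([], [])

-- the while loop: two pointers over the sorted lists = structural recursion on suffixes
def pvMergeLoop : List Char → List Char → List Char → List Char
  | a :: as, b :: bs, out =>
    if a < b then pvMergeLoop as (b :: bs) out
    else if b < a then pvMergeLoop (a :: as) bs out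
    else pvMergeLoop as bs (if out.getLast? = some a then out else out ++ [a])
  | _, _, out => out
  termination_by gl tl _ => gl.length + tl.length

def yellow_alt (guess : String) (target : String) : List String :=
  let gl := PySem.List.sorted (pvLetters guess target).1 (fun c => c) false
  let tl := PySem.List.sorted (pvLetters guess target).2 (fun c => c) false
  (pvMergeLoop gl tl []).map (fun c => String.ofList [c])

-- ===== PRECONDITION & SPEC =====
-- A indexes guess[i] and target[i] for i in range(5): shorter strings raise IndexError.
def Pre_yellow (guess : String) (target : String) : Prop :=
  5 ≤ guess.toList.length ∧ 5 ≤ target.toList.length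
instance (guess : String) (target : String) : Decidable (Pre_yellow guess target) := by
  unfold Pre_yellow; infer_instance
def pvWitness_yellow : String × String := ("crane", "plant")

def Spec_yellow (guess : String) (target : String) (out : List String) : Prop := out = yellow_alt guess target
instance (guess : String) (target : String) (out : List String) : Decidable (Spec_yellow guess target out) := by unfold Spec_yellow; infer_instance

-- ===== CLAIM (what is proved, stated in full; the proofs are below) =====
def Claim_equal_yellow : Prop := ∀ (guess : String) (target : String), Dom_yellow guess target → Pre_yellow guess target → Spec_yellow guess target (yellow guess target)

-- ===== LEMMAS AND PROOFS =====

-- singleton strings compare like their characters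
theorem single_lt (c d : Char) : (String.ofList [c] < String.ofList [d]) ↔ c < d := by
  rw [String.lt_iff_toList_lt, String.toList_ofList, String.toList_ofList]
  constructor
  · intro h; cases h with
    | rel h => exact h
    | cons h => cases h
  · intro h; exact List.Lex.rel h

-- ---- A-side characterisation ----

theorem mem_pvGreen (guess target : String) (i : Int) :
    i ∈ pvGreen guess target ↔ i ∈ PySem.List.pyRange 0 5 1 ∧
      PySem.List.pyGetD guess.toList i ' ' = PySem.List.pyGetD target.toList i ' ' := by
  unfold pvGreen
  rw [PySem.List.foldl_append_ite_eq_filter]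
  simp [List.mem_filter]

-- generic: membership in a fold whose step either leaves the set or adds elements with property P
theorem mem_foldl_iff {β : Type} [BEq β] [LawfulBEq β] (l : List Int)
    (F : PySem.Set β → Int → PySem.Set β) (P : Int → β → Prop)
    (h : ∀ s i x, i ∈ l → (x ∈ F s i ↔ x ∈ s ∨ P i x)) :
    ∀ (s0 : PySem.Set β) (x : β), x ∈ l.foldl F s0 ↔ x ∈ s0 ∨ ∃ i ∈ l, P i x := by
  induction l with
  | nil => simp
  | cons a l ih =>
    intro s0 x
    have hl : ∀ s i x, i ∈ l → (x ∈ F s i ↔ x ∈ s ∨ P i x) := by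
      intro s i x hi; exact h s i x (by simp [hi])
    simp only [List.foldl_cons]
    rw [ih hl, h s0 a x (by simp)]
    constructor
    · rintro ((hx | hp) | ⟨i, hi, hp⟩)
      · exact Or.inl hx
      · exact Or.inr ⟨a, by simp, hp⟩
      · exact Or.inr ⟨i, by simp [hi], hp⟩
    · rintro (hx | ⟨i, hi, hp⟩)
      · exact Or.inl (Or.inl hx)
      · rcases List.mem_cons.mp hi with rfl | hi
        · exact Or.inl (Or.inr hp)
        · exact Or.inr ⟨i, hi, hp⟩

-- generic: such a fold preserves Nodup when each step does
theorem nodup_foldl {β : Type} (l : List Int)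
    (F : PySem.Set β → Int → PySem.Set β)
    (h : ∀ s i, s.Nodup → (F s i).Nodup) :
    ∀ (s0 : PySem.Set β), s0.Nodup → (l.foldl F s0).Nodup := by
  induction l with
  | nil => intro s0 hs; simpa using hs
  | cons a l ih => intro s0 hs; simp only [List.foldl_cons]; exact ih _ (h s0 a hs)

theorem nodup_addIf {β : Type} [BEq β] [LawfulBEq β] (s : PySem.Set β) (c : Prop) [Decidable c]
    (v : β) (hs : s.Nodup) : (if c then PySem.Set.add s v else s).Nodup := by
  split_ifs
  · exact PySem.Set.nodup_add s v hs
  · exact hs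

theorem mem_addIf {β : Type} [BEq β] [LawfulBEq β] (s : PySem.Set β) (c : Prop) [Decidable c]
    (v x : β) : x ∈ (if c then PySem.Set.add s v else s) ↔ x ∈ s ∨ (c ∧ x = v) := by
  split_ifs with hc
  · rw [PySem.Set.mem_add]; tauto
  · tauto

theorem mem_possible (guess target : String) (x : String) :
    x ∈ (PySem.List.pyRange 0 5 1).foldl
      (fun poss i =>
        if i ∉ pvGreen guess target then
          (PySem.List.pyRange 0 5 1).foldl
            (fun poss j =>
              if j ∉ pvGreen guess target ∧ PySem.List.pyGetD guess.toList i ' ' = PySem.List.pyGetD target.toList j ' '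
              then PySem.Set.add poss (String.ofList [PySem.List.pyGetD guess.toList i ' '])
              else poss) poss
        else poss) PySem.Set.empty ↔
    ∃ i ∈ PySem.List.pyRange 0 5 1, i ∉ pvGreen guess target ∧
      ∃ j ∈ PySem.List.pyRange 0 5 1,
        (j ∉ pvGreen guess target ∧ PySem.List.pyGetD guess.toList i ' ' = PySem.List.pyGetD target.toList j ' ') ∧
          x = String.ofList [PySem.List.pyGetD guess.toList i ' '] := by
  rw [mem_foldl_iff _ _
      (fun i x => i ∉ pvGreen guess target ∧
        ∃ j ∈ PySem.List.pyRange 0 5 1,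
          (j ∉ pvGreen guess target ∧ PySem.List.pyGetD guess.toList i ' ' = PySem.List.pyGetD target.toList j ' ') ∧
            x = String.ofList [PySem.List.pyGetD guess.toList i ' ']) ?_]
  · simp [PySem.Set.empty]
  · intro s i x _
    split_ifs with hi
    · tauto
    · rw [mem_foldl_iff _ _
          (fun j x => (j ∉ pvGreen guess target ∧ PySem.List.pyGetD guess.toList i ' ' = PySem.List.pyGetD target.toList j ' ') ∧
            x = String.ofList [PySem.List.pyGetD guess.toList i ' '])
          (fun s j x _ => mem_addIf s _ _ x)]
      constructor
      · rintro (h | h)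
        · exact Or.inl h
        · exact Or.inr ⟨hi, h⟩
      · rintro (h | ⟨_, h⟩)
        · exact Or.inl h
        · exact Or.inr h

theorem nodup_possible (guess target : String) :
    ((PySem.List.pyRange 0 5 1).foldl
      (fun poss i =>
        if i ∉ pvGreen guess target then
          (PySem.List.pyRange 0 5 1).foldl
            (fun poss j =>
              if j ∉ pvGreen guess target ∧ PySem.List.pyGetD guess.toList i ' ' = PySem.List.pyGetD target.toList j ' '
              then PySem.Set.add poss (String.ofList [PySem.List.pyGetD guess.toList i ' '])
              else poss) poss
        else poss) (PySem.Set.empty : PySem.Set String)).Nodup := by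
  apply nodup_foldl
  · intro s i hs
    split_ifs <;>
      first
        | exact hs
        | exact nodup_foldl _
            (fun poss j =>
              if j ∉ pvGreen guess target ∧ PySem.List.pyGetD guess.toList i ' ' = PySem.List.pyGetD target.toList j ' '
              then PySem.Set.add poss (String.ofList [PySem.List.pyGetD guess.toList i ' '])
              else poss)
            (fun s j hsj => nodup_addIf s _ _ hsj) s hs
  · simp [PySem.Set.empty]

-- ---- B-side characterisation ----

theorem pvLetters_eq (guess target : String) :
    pvLetters guess target =
      (((PySem.List.pyRange 0 5 1).filter
          (fun i => decide (PySem.List.pyGetD guess.toList i ' ' ≠ PySem.List.pyGetD target.toList i ' '))).map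
            (fun i => PySem.List.pyGetD guess.toList i ' '),
       ((PySem.List.pyRange 0 5 1).filter
          (fun i => decide (PySem.List.pyGetD guess.toList i ' ' ≠ PySem.List.pyGetD target.toList i ' '))).map
            (fun i => PySem.List.pyGetD target.toList i ' ')) := by
  unfold pvLetters
  generalize PySem.List.pyRange 0 5 1 = l
  suffices h : ∀ (x y : List Char),
      l.foldl
        (fun p i =>
          if PySem.List.pyGetD guess.toList i ' ' ≠ PySem.List.pyGetD target.toList i ' '
          then (p.1 ++ [PySem.List.pyGetD guess.toList i ' '],
                p.2 ++ [PySem.List.pyGetD target.toList i ' '])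
          else p) (x, y) =
      (x ++ (l.filter (fun i => decide (PySem.List.pyGetD guess.toList i ' ' ≠ PySem.List.pyGetD target.toList i ' '))).map
              (fun i => PySem.List.pyGetD guess.toList i ' '),
       y ++ (l.filter (fun i => decide (PySem.List.pyGetD guess.toList i ' ' ≠ PySem.List.pyGetD target.toList i ' '))).map
              (fun i => PySem.List.pyGetD target.toList i ' ')) by
    simpa using h [] []
  induction l with
  | nil => intro x y; simp
  | cons a l ih =>
    intro x y
    rw [List.foldl_cons, List.filter_cons]
    by_cases ha : PySem.List.pyGetD guess.toList a ' ' ≠ PySem.List.pyGetD target.toList a ' '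
    · rw [if_pos ha, ih]
      simp [ha]
    · rw [if_neg ha, ih]
      simp [ha]

theorem mem_letters_fst (guess target : String) (c : Char) :
    c ∈ (pvLetters guess target).1 ↔
      ∃ i ∈ PySem.List.pyRange 0 5 1,
        PySem.List.pyGetD guess.toList i ' ' ≠ PySem.List.pyGetD target.toList i ' ' ∧
          c = PySem.List.pyGetD guess.toList i ' ' := by
  rw [pvLetters_eq]
  simp only [List.mem_map, List.mem_filter, decide_eq_true_eq]
  constructor
  · rintro ⟨i, ⟨h1, h2⟩, h3⟩; exact ⟨i, h1, h2, h3.symm⟩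
  · rintro ⟨i, h1, h2, h3⟩; exact ⟨i, ⟨h1, h2⟩, h3.symm⟩

theorem mem_letters_snd (guess target : String) (c : Char) :
    c ∈ (pvLetters guess target).2 ↔
      ∃ i ∈ PySem.List.pyRange 0 5 1,
        PySem.List.pyGetD guess.toList i ' ' ≠ PySem.List.pyGetD target.toList i ' ' ∧
          c = PySem.List.pyGetD target.toList i ' ' := by
  rw [pvLetters_eq]
  simp only [List.mem_map, List.mem_filter, decide_eq_true_eq]
  constructor
  · rintro ⟨i, ⟨h1, h2⟩, h3⟩; exact ⟨i, h1, h2, h3.symm⟩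
  · rintro ⟨i, h1, h2, h3⟩; exact ⟨i, ⟨h1, h2⟩, h3.symm⟩

-- ---- merge-loop correctness ----

theorem head_le_of_sorted (a : Char) (l : List Char) (h : (a :: l).Pairwise (· ≤ ·)) :
    ∀ x ∈ a :: l, a ≤ x := by
  intro x hx
  rcases List.mem_cons.mp hx with rfl | hx
  · exact le_refl x
  · exact (List.pairwise_cons.mp h).1 x hx

theorem last_ge : ∀ (out : List Char), out.Pairwise (· < ·) → ∀ x ∈ out,
    ∃ l, out.getLast? = some l ∧ x ≤ l := by
  intro out
  induction out with
  | nil => intro _ x hx; cases hx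
  | cons y ys ih =>
    intro h x hx
    cases ys with
    | nil =>
      simp only [List.mem_singleton] at hx
      subst hx
      exact ⟨x, rfl, le_refl x⟩
    | cons z zs =>
      have h' := List.pairwise_cons.mp h
      rcases List.mem_cons.mp hx with rfl | hx
      · obtain ⟨l, hl, hzl⟩ := ih h'.2 z (by simp)
        exact ⟨l, by rw [List.getLast?_cons_cons]; exact hl,
          le_trans (le_of_lt (h'.1 z (by simp))) hzl⟩
      · obtain ⟨l, hl, hxl⟩ := ih h'.2 x hx
        exact ⟨l, by rw [List.getLast?_cons_cons]; exact hl, hxl⟩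

theorem last_of_max (out : List Char) (h : out.Pairwise (· < ·)) (a : Char) (ha : a ∈ out)
    (hmax : ∀ x ∈ out, x ≤ a) : out.getLast? = some a := by
  obtain ⟨l, hl, hal⟩ := last_ge out h a ha
  have hla : l ≤ a := hmax l (List.mem_of_getLast? hl)
  rw [hl, le_antisymm hla hal]

theorem merge_spec : ∀ (n : Nat) (gl tl out : List Char), gl.length + tl.length ≤ n →
    gl.Pairwise (· ≤ ·) → tl.Pairwise (· ≤ ·) → out.Pairwise (· < ·) →
    (∀ x ∈ out, ∀ a ∈ gl, x ≤ a) → (∀ x ∈ out, ∀ b ∈ tl, x ≤ b) →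
    (pvMergeLoop gl tl out).Pairwise (· < ·) ∧
      ∀ c, c ∈ pvMergeLoop gl tl out ↔
        c ∈ out ∨ (c ∈ gl ∧ c ∈ tl ∧ out.getLast? ≠ some c) := by
  intro n
  induction n with
  | zero =>
    intro gl tl out hn _ _ hout _ _
    have : gl = [] := by cases gl <;> simp_all
    subst this
    simp [pvMergeLoop, hout]
  | succ n ih =>
    intro gl tl out hn hg ht hout hog hot
    match gl, tl with
    | [], tl => simp [pvMergeLoop, hout]
    | a :: as, [] => simp [pvMergeLoop, hout]
    | a :: as, b :: bs =>
      rw [pvMergeLoop]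
      by_cases hab : a < b
      · rw [if_pos hab]
        have has : as.Pairwise (· ≤ ·) := (List.pairwise_cons.mp hg).2
        obtain ⟨hp, hm⟩ := ih as (b :: bs) out (by simp at hn ⊢; omega) has ht hout
          (fun x hx y hy => hog x hx y (by simp [hy])) hot
        refine ⟨hp, fun c => ?_⟩
        rw [hm c]
        constructor
        · rintro (hc | ⟨h1, h2, h3⟩)
          · exact Or.inl hc
          · exact Or.inr ⟨by simp [h1], h2, h3⟩
        · rintro (hc | ⟨h1, h2, h3⟩)
          · exact Or.inl hc
          · rcases List.mem_cons.mp h1 with rfl | h1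
            · exact absurd (head_le_of_sorted b bs ht c h2) (by simp; exact hab)
            · exact Or.inr ⟨h1, h2, h3⟩
      · rw [if_neg hab]
        by_cases hba : b < a
        · rw [if_pos hba]
          have hbs : bs.Pairwise (· ≤ ·) := (List.pairwise_cons.mp ht).2
          obtain ⟨hp, hm⟩ := ih (a :: as) bs out (by simp at hn ⊢; omega) hg hbs hout hog
            (fun x hx y hy => hot x hx y (by simp [hy]))
          refine ⟨hp, fun c => ?_⟩
          rw [hm c]
          constructor
          · rintro (hc | ⟨h1, h2, h3⟩)
            · exact Or.inl hc
            · exact Or.inr ⟨h1, by simp [h2], h3⟩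
          · rintro (hc | ⟨h1, h2, h3⟩)
            · exact Or.inl hc
            · rcases List.mem_cons.mp h2 with rfl | h2
              · exact absurd (head_le_of_sorted a as hg c h1) (by simp; exact hba)
              · exact Or.inr ⟨h1, h2, h3⟩
        · rw [if_neg hba]
          have hba' : b = a := le_antisymm (not_lt.mp hab) (not_lt.mp hba)
          subst hba'
          have has : as.Pairwise (· ≤ ·) := (List.pairwise_cons.mp hg).2
          have hbs : bs.Pairwise (· ≤ ·) := (List.pairwise_cons.mp ht).2
          by_cases hlast : out.getLast? = some b
          · rw [if_pos hlast]
            have hbout : b ∈ out := List.mem_of_getLast? hlast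
            obtain ⟨hp, hm⟩ := ih as bs out (by simp at hn ⊢; omega) has hbs hout
              (fun x hx y hy => hog x hx y (by simp [hy]))
              (fun x hx y hy => hot x hx y (by simp [hy]))
            refine ⟨hp, fun c => ?_⟩
            rw [hm c]
            constructor
            · rintro (hc | ⟨h1, h2, h3⟩)
              · exact Or.inl hc
              · exact Or.inr ⟨by simp [h1], by simp [h2], h3⟩
            · rintro (hc | ⟨h1, h2, h3⟩)
              · exact Or.inl hc
              · have hcb : c ≠ b := fun h => h3 (h ▸ hlast)
                rcases List.mem_cons.mp h1 with rfl | h1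
                · exact absurd rfl hcb
                · rcases List.mem_cons.mp h2 with rfl | h2
                  · exact absurd rfl hcb
                  · exact Or.inr ⟨h1, h2, h3⟩
          · rw [if_neg hlast]
            -- every element of out is strictly below b
            have hlt : ∀ x ∈ out, x < b := by
              intro x hx
              have hxb : x ≤ b := hog x hx b (by simp)
              rcases lt_or_eq_of_le hxb with h | rfl
              · exact h
              · exact absurd (last_of_max out hout x hx (fun y hy => hog y hy x (by simp))) hlast
            have hout' : (out ++ [b]).Pairwise (· < ·) := by
              rw [List.pairwise_append]
              exact ⟨hout, by simp, by simpa using hlt⟩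
            obtain ⟨hp, hm⟩ := ih as bs (out ++ [b]) (by simp at hn ⊢; omega) has hbs hout'
              (fun x hx y hy => by
                rcases List.mem_append.mp hx with hx | hx
                · exact hog x hx y (by simp [hy])
                · simp only [List.mem_singleton] at hx; subst hx
                  exact (List.pairwise_cons.mp hg).1 y hy)
              (fun x hx y hy => by
                rcases List.mem_append.mp hx with hx | hx
                · exact hot x hx y (by simp [hy])
                · simp only [List.mem_singleton] at hx; subst hx
                  exact (List.pairwise_cons.mp ht).1 y hy)
            refine ⟨hp, fun c => ?_⟩
            rw [hm c]
            have hlastb : (out ++ [b]).getLast? = some b := by simp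
            constructor
            · rintro (hc | ⟨h1, h2, h3⟩)
              · rcases List.mem_append.mp hc with hc | hc
                · exact Or.inl hc
                · simp only [List.mem_singleton] at hc; subst hc
                  exact Or.inr ⟨by simp, by simp, hlast⟩
              · by_cases hco : c ∈ out
                · exact Or.inl hco
                · refine Or.inr ⟨by simp [h1], by simp [h2], fun h => hco (List.mem_of_getLast? h)⟩
            · rintro (hc | ⟨h1, h2, h3⟩)
              · exact Or.inl (List.mem_append.mpr (Or.inl hc))
              · by_cases hcb : c = b
                · exact Or.inl (List.mem_append.mpr (Or.inr (by simp [hcb])))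
                · rcases List.mem_cons.mp h1 with rfl | h1
                  · exact absurd rfl hcb
                  · rcases List.mem_cons.mp h2 with rfl | h2
                    · exact absurd rfl hcb
                    · refine Or.inr ⟨h1, h2, ?_⟩
                      rw [hlastb]
                      intro h
                      exact hcb (Option.some.inj h).symm

theorem merge_final (gs ts : List Char) (hg : gs.Pairwise (· ≤ ·)) (ht : ts.Pairwise (· ≤ ·)) :
    (pvMergeLoop gs ts []).Pairwise (· < ·) ∧
      ∀ c, c ∈ pvMergeLoop gs ts [] ↔ c ∈ gs ∧ c ∈ ts := by
  obtain ⟨hp, hm⟩ := merge_spec (gs.length + ts.length) gs ts [] (le_refl _) hg ht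
    (by simp) (by simp) (by simp)
  refine ⟨hp, fun c => ?_⟩
  rw [hm c]
  simp

-- ===== VERDICT (by name: the statement is the Claim_ definition above) =====
theorem yellow_spec : Claim_equal_yellow := by
  intro guess target _ _
  unfold Spec_yellow yellow yellow_alt
  dsimp only
  obtain ⟨hp, hm⟩ := merge_final
    (PySem.List.sorted (pvLetters guess target).1 (fun c => c) false)
    (PySem.List.sorted (pvLetters guess target).2 (fun c => c) false)
    (PySem.List.sorted_pairwise _ _) (PySem.List.sorted_pairwise _ _)
  set M := pvMergeLoop
    (PySem.List.sorted (pvLetters guess target).1 (fun c => c) false)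
    (PySem.List.sorted (pvLetters guess target).2 (fun c => c) false) [] with hM
  -- B's output is strictly increasing in String order
  have hSp : (M.map (fun c => String.ofList [c])).Pairwise (· < ·) := by
    refine List.Pairwise.map _ ?_ hp
    intro a b hab
    exact (single_lt a b).mpr hab
  apply PySem.List.sorted_eq_of_perm_of_pairwise_lt
  · -- the merged map is a permutation of A's set
    apply (List.perm_ext_iff_of_nodup ?_ (nodup_possible guess target)).mpr
    · intro x
      rw [mem_possible]
      simp only [List.mem_map]
      constructor
      · rintro ⟨c, hc, rfl⟩
        rw [hm c] at hc
        obtain ⟨hc1, hc2⟩ := hc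
        rw [PySem.List.mem_sorted, mem_letters_fst] at hc1
        rw [PySem.List.mem_sorted, mem_letters_snd] at hc2
        obtain ⟨i, hi, hine, rfl⟩ := hc1
        obtain ⟨j, hj, hjne, hcj⟩ := hc2
        refine ⟨i, hi, ?_, j, hj, ⟨?_, hcj⟩, rfl⟩
        · rw [mem_pvGreen]; tauto
        · rw [mem_pvGreen]; tauto
      · rintro ⟨i, hi, hic, j, hj, ⟨hjc, hEq⟩, rfl⟩
        rw [mem_pvGreen] at hic hjc
        refine ⟨PySem.List.pyGetD guess.toList i ' ', ?_, rfl⟩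
        rw [hm]
        constructor
        · rw [PySem.List.mem_sorted, mem_letters_fst]
          exact ⟨i, hi, fun h => hic ⟨hi, h⟩, rfl⟩
        · rw [PySem.List.mem_sorted, mem_letters_snd]
          exact ⟨j, hj, fun h => hjc ⟨hj, h⟩, hEq⟩
    · exact (hSp.imp ne_of_lt)
  · exact hSp
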